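/- GENERATED by mk_final_copies.py from the proof of the farm's unit `stb_vorbis_get_frame_float.5` (farm:stb_vorbis_get_frame_float.5.1: Lemmas.lean) as the
   re-elaboration sweep compiled it — do not edit. -/
import Asan.CheckWalk
import Vorbis.Spec.Units.stb_vorbis_get_frame_float_5

/- LEMMAS OF SEGMENT 5 OF stb_vorbis_get_frame_float (119806H … 119870H: the four checked stores after the loop). Nothing here
   walks: `seg5_exit` builds the exit assertion `AtEpi` from the entry assertion `AtStores` and a FOOTPRINT of the segment's
   stores (`Mem.SameExcept spans v.mem s.mem`, every span a `seg5_SpanOK`), so that the four paths of the walk (channels / output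
   NULL or not) share one proof. -/
open X86 X86.User Asan Vorbis Vorbis.Spec

set_option maxRecDepth 4000
set_option maxHeartbeats 4000000

namespace Vorbis.Spec.stb_vorbis_get_frame_float_5

/-- **Where segment 5 stores** (`u` = the function's entry state, `f` = the decoder object): the slot of the check calls' return
address `[R − 192, R − 184)`, `channel_buffer_start / _end` `[f + 1796, f + 1804)`, `*channels` and `*output` when not NULL. -/
def seg5_SpanOK (u : State) (f : Nat) (w : Span) : Prop :=
  ((u.reg .rsp).toNat - 192 ≤ w.lo ∧ w.hi ≤ (u.reg .rsp).toNat - 184) ∨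
  (f + 1796 ≤ w.lo ∧ w.hi ≤ f + 1804) ∨
  ((u.reg .rsi).toNat ≠ 0 ∧ (u.reg .rsi).toNat ≤ w.lo ∧ w.hi ≤ (u.reg .rsi).toNat + 4) ∨
  ((u.reg .rdx).toNat ≠ 0 ∧ (u.reg .rdx).toNat ≤ w.lo ∧ w.hi ≤ (u.reg .rdx).toNat + 8)

/-- **Where an out-pointer points**: NULL, or a stack object of the callers' frames, which lies at or above `R + 8` (the end of
the clean stack at the entry: `LiveIn.above`) and inside the stack region. -/
theorem seg5_out_where {others : List Obj} {frames : List (Nat × FrameLayout)} {u : State}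
    (hsh : ShadowPre others frames u) {p n : Nat} (hn : 0 < n) (hp : p = 0 ∨ StackObj others frames p n) :
    p = 0 ∨ ((u.reg .rsp).toNat + 8 ≤ p ∧ p + n ≤ 0x800000) := by
  rcases hp with h0 | hobj
  · exact Or.inl h0
  · have h1 := hobj.1.above hsh.inv
    have h2 := hobj.2
    exact Or.inr (by omega)

/-- A stack object of the callers' frames is live for the frame list with the function's own frame in front. -/
theorem seg5_out_live {others : List Obj} {frames : List (Nat × FrameLayout)} {p n : Nat} (base : Nat)
    (hp : StackObj others frames p n) :
    LiveIn others ((base, stb_vorbis_get_frame_float.ownFL) :: frames) p n := by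
  obtain ⟨o, ho, h1, h2⟩ := hp.1
  exact ⟨o, stb_vorbis_get_frame_float.gff_objs_sub others frames base o ho, h1, h2⟩

/-- The low half of a small number, as the walker writes it. -/
theorem seg5_part32 (n : Nat) (h : n < 2 ^ 32) : (Word.part .w32 (UInt64.ofNat n)).toNat = n := by
  rw [Vorbis.toNat_part32, UInt64.toNat_ofNat']
  omega

/-- `mov ebp, [rsp+40H]` with the slot holding `r < 2 ^ 31`: rbp is `r`, zero-extended. -/
theorem seg5_result (r : Nat) (h : r < 2 ^ 31) : Word.ofBV (BitVec.ofNat 32 r) = UInt64.ofNat r := by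
  rw [Vorbis.ofBV_eq_addr _ (by decide), BitVec.toNat_ofNat]
  have e : r % 2 ^ 32 = r := Nat.mod_eq_of_lt (by omega)
  rw [e]
  rfl

/-- Reading back the four bytes that `mov [m32], r32` has just stored. -/
theorem seg5_read_stored32 (M : Mem) (a x : Word) :
    (M.writeLE a 4 (Word.part .w32 x).toNat).readLE a 4 = (Word.part .w32 x).toNat := by
  rw [Mem.readLE_writeLE_same _ _ _ _ (by decide)]
  have h := (Word.part .w32 x).isLt
  have e : (256 : Nat) ^ 4 = 2 ^ 32 := by decide
  rw [e]
  exact Nat.mod_eq_of_lt h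

/-- **`*channels` read back on the path with both stores**: through the return address of the last check call (below `R`)
and the qword stored into `*output` (apart from `*channels`). -/
theorem seg5_read_channels (M : Mem) (sp pc po x : Word) (k y : Nat) (hlo : 0x700000 + 4240 ≤ sp.toNat)
    (h1 : sp.toNat + 8 ≤ pc.toNat) (h2 : pc.toNat + 4 ≤ 0x800000) (h3 : po.toNat + 8 ≤ 0x800000)
    (hap : pc.toNat + 4 ≤ po.toNat ∨ po.toNat + 8 ≤ pc.toNat) :
    (((M.writeLE pc 4 (Word.part .w32 x).toNat).writeLE (sp - 192) 8 k).writeLE po 8 y).readLE pc 4 =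
      (Word.part .w32 x).toNat := by
  have e : (sp - 192).toNat = sp.toNat - 192 := by u_omega
  rw [Mem.readLE_writeLE_disjoint_noWrap _ _ _ _ _ _ (by unfold Mem.NoWrap; omega) (by unfold Mem.NoWrap; omega) (by omega),
    Mem.readLE_writeLE_disjoint_noWrap _ _ _ _ _ _ (by unfold Mem.NoWrap; omega) (by unfold Mem.NoWrap; omega) (by omega)]
  exact seg5_read_stored32 M pc x

/-- **The exit assertion of segment 5** from its entry assertion and the footprint of its stores: `s` is the state at the
epilogue's head 119769H; `hs`, `hsp` = what was stored since `v` (every span a `seg5_SpanOK`), `hun` = no shadow byte among it,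
`hc` / `ho` = the values read back from `*channels` / `*output` when the pointer is not NULL (in the walker's form). -/
theorem seg5_exit {others : List Obj} {frames : List (Nat × FrameLayout)} {len : Nat} {A : Arena} {stored room : Int}
    {ysz : Nat → Nat} {u₀ u : State} {ret : Word} {f left r ch : Nat} {v s : State} {spans : List Span}
    (hat : stb_vorbis_get_frame_float.AtStores others frames len A stored room ysz u₀ u ret f left r ch v)
    (hrip : s.rip = L.stb_vorbis_get_frame_float.at_119769)
    (hrsp : s.reg .rsp = u.reg .rsp - 184)
    (hr14 : s.reg .r14 = v.reg .r14)
    (hrbp : s.reg .rbp = Word.ofBV (BitVec.ofNat 32 r))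
    (hcode : (conv u₀).code.In s.mem)
    (hinvS : (conv u₀).inv s)
    (hs : Mem.SameExcept spans v.mem s.mem)
    (hsp : ∀ w, w ∈ spans → seg5_SpanOK u f w)
    (hun : ShadowUntouched v.mem s.mem)
    (hc : (u.reg .rsi).toNat ≠ 0 → s.mem.readLE (u.reg .rsi) 4 = (Word.part .w32 (UInt64.ofNat ch)).toNat)
    (ho : (u.reg .rdx).toNat ≠ 0 → s.mem.readLE (u.reg .rdx) 8 = (addr f + 1000).toNat) :
    stb_vorbis_get_frame_float.AtEpi others frames len A stored room ysz u₀ u ret f r s := by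
  -- the entry state's facts, from the assertion
  have he := hat.body.frame.entry
  have hpre := hat.body.frame.pre
  have he_room : 0x700000 + 4240 ≤ (u.reg .rsp).toNat := he.room
  have he_top : (u.reg .rsp).toNat + 8 ≤ 0x800000 := he.top
  obtain ⟨hsh, _, hpc, hpo, _⟩ := hpre
  obtain ⟨_, hbody, _, hchan, _, _, hr31, _, _, hbound, houts⟩ := hat
  obtain ⟨hfrm, _, _, _⟩ := hbody
  obtain ⟨he0, hpre0, hf, _, j_r14, hs15, hs14, hs13, hs12, hsbp, hsbx, hs0, hsame, _, _, hinv, hdi⟩ := hfrm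
  have hwf := stb_vorbis_get_frame_float.gff_obj_where hdi
  have hpcw := seg5_out_where hsh (by decide) hpc
  have hpow := seg5_out_where hsh (by decide) hpo
  have h16 := hdi.config.header.HD1
  clear hpc hpo
  -- a qword of the frame `[R − 176, R + 8)` is none of the segment's stores
  have rd8 : ∀ a : Word, (u.reg .rsp).toNat - 176 ≤ a.toNat → a.toNat + 8 ≤ (u.reg .rsp).toNat + 8 →
      s.mem.readLE a 8 = v.mem.readLE a 8 := by
    intro a h1 h2
    refine hs.readLE a 8 (by omega) ?_
    intro w hw
    rcases hsp w hw with h | h | h | h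
    · omega
    · omega
    · omega
    · omega
  -- a field of `*f` below `channel_buffer_start` is none of the segment's stores
  have rdf : ∀ a k : Nat, f ≤ a → a + k ≤ f + 1796 → s.mem.readLE (addr a) k = v.mem.readLE (addr a) k := by
    intro a k h1 h2
    have ea : (addr a).toNat = a := toNat_addr a (by omega)
    refine hs.readLE (addr a) k (by omega) ?_
    intro w hw
    rw [ea]
    rcases hsp w hw with h | h | h | h
    · omega
    · omega
    · omega
    · omega
  have e0 : (u.reg .rsp).toNat ≤ (u.reg .rsp).toNat := Nat.le_refl _
  have e8 : (u.reg .rsp - 8).toNat = (u.reg .rsp).toNat - 8 := by u_omega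
  have e16 : (u.reg .rsp - 16).toNat = (u.reg .rsp).toNat - 16 := by u_omega
  have e24 : (u.reg .rsp - 24).toNat = (u.reg .rsp).toNat - 24 := by u_omega
  have e32 : (u.reg .rsp - 32).toNat = (u.reg .rsp).toNat - 32 := by u_omega
  have e40 : (u.reg .rsp - 40).toNat = (u.reg .rsp).toNat - 40 := by u_omega
  have e48 : (u.reg .rsp - 48).toNat = (u.reg .rsp).toNat - 48 := by u_omega
  -- the shadow layer and the decode-time invariant over the stores
  have hinv' : ShadowInv others (stb_vorbis_get_frame_float.ownFrames u frames) ((u.reg .rsp).toNat - 184) s.mem :=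
    hinv.untouched hun
  have hdi' : DecodeInv others (stb_vorbis_get_frame_float.ownFrames u frames) len A stored room ysz s.mem f := by
    refine stb_vorbis_get_frame_float.decodeInv_stores hdi hinv' hs ?_
    intro w hw
    unfold stb_vorbis_get_frame_float.OwnSpan
    rcases hsp w hw with h | h | h | h
    · left
      omega
    · right
      right
      exact h
    · left
      omega
    · left
      omega
  -- the contract's footprint
  have hsame' : Mem.SameExcept [⟨(u.reg .rsp).toNat - 4240, (u.reg .rsp).toNat⟩, ⟨A.B, A.B + A.L⟩, ⟨0xC00000, 0xE00000⟩,
      ⟨(u.reg .rsi).toNat, (u.reg .rsi).toNat + 4⟩, ⟨(u.reg .rdx).toNat, (u.reg .rdx).toNat + 8⟩] u.mem s.mem := by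
    refine Mem.SameExcept.step_same hsame hs ?_
    intro w hw a h1 h2
    rcases hsp w hw with h | h | h | h
    · exact ⟨_, List.mem_cons_self .., by dsimp only; omega, by dsimp only; omega⟩
    · refine ⟨⟨A.B, A.B + A.L⟩, ?_, by dsimp only; omega, by dsimp only; omega⟩
      simp only [List.mem_cons, true_or, or_true]
    · refine ⟨⟨(u.reg .rsi).toNat, (u.reg .rsi).toNat + 4⟩, ?_, by dsimp only; omega, by dsimp only; omega⟩
      simp only [List.mem_cons, true_or, or_true]
    · refine ⟨⟨(u.reg .rdx).toNat, (u.reg .rdx).toNat + 8⟩, ?_, by dsimp only; omega, by dsimp only; omega⟩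
      simp only [List.mem_cons, true_or, or_true]
  have hframe : stb_vorbis_get_frame_float.GFrame others frames len A stored room ysz u₀ u ret f s := by
    refine ⟨he0, hpre0, hf, hrsp, ?_, ?_, ?_, ?_, ?_, ?_, ?_, ?_, hsame', hcode, hinvS, hinv', hdi'⟩
    · rw [hr14]
      exact j_r14
    · rw [rd8 _ (by omega) (by omega)]
      exact hs15
    · rw [rd8 _ (by omega) (by omega)]
      exact hs14
    · rw [rd8 _ (by omega) (by omega)]
      exact hs13
    · rw [rd8 _ (by omega) (by omega)]
      exact hs12
    · rw [rd8 _ (by omega) (by omega)]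
      exact hsbp
    · rw [rd8 _ (by omega) (by omega)]
      exact hsbx
    · rw [rd8 _ (by omega) (by omega)]
      exact hs0
  -- the fields of `*f` that `FrameOut` reads
  have ech : stb_vorbis.channels s.mem f = stb_vorbis.channels v.mem f := by
    simp only [vacc, voff]
    unfold Mem.i32 Mem.u32
    rw [rdf _ 4 (by omega) (by omega)]
  have eb1 : stb_vorbis.blocksize_1 s.mem f = stb_vorbis.blocksize_1 v.mem f := by
    simp only [vacc, voff]
    unfold Mem.i32 Mem.u32
    rw [rdf _ 4 (by omega) (by omega)]
  refine ⟨hrip, hframe, ?_, hr31, ?_⟩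
  · rw [hrbp]
    exact seg5_result r hr31
  · intro _
    refine ⟨?_, ?_, left, ?_, ?_⟩
    · -- `*channels = f->channels`
      intro hne
      rw [ech, hchan]
      unfold Mem.i32 Mem.u32
      rw [addr_toNat, hc hne, seg5_part32 ch (by omega)]
      unfold sint32
      rw [hchan] at h16
      split <;> omega
    · -- `*output = f->outputs`
      intro hne
      unfold Mem.ptr Mem.u64
      rw [addr_toNat, ho hne]
      simp only [vfield, voff]
      exact toNat_addr _ (by omega)
    · rw [eb1]
      exact hbound
    · intro c hc'
      rw [ech, hchan] at hc'
      rw [hchan] at h16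
      have hc16 : c < 16 := by omega
      have hcc : c < ch := by omega
      have := houts c hcc
      simp only [vacc, voff] at this ⊢
      unfold Mem.u64 at this ⊢
      rw [rdf _ 8 (by omega) (by omega), rdf _ 8 (by omega) (by omega)]
      exact this

end Vorbis.Spec.stb_vorbis_get_frame_float_5
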